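-- pv_equiv track=rewrite | github.com/chriswatrous/pytronica | lib/synth.py | first_to_center
-- ===== SOURCE A (Python) =====
-- from collections import deque
--
-- def first_to_center(xs):
--     left = True
--     d = deque()
--     for x in xs:
--         if left:
--             d.appendleft(x)
--         else:
--             d.append(x)
--         left = not left
--     return list(d)
-- ===== SOURCE B (Python) =====
-- def first_to_center(xs):
--     evens = xs[::2]
--     odds = xs[1::2]
--     return evens[::-1] + odds
-- ===== Notes on version B (the rewrite author's own statement) =====
-- stated objective: simpler
-- what changed: Replaces the deque-and-flag loop with two extended slices: the even-indexed elements reversed, concatenated with the odd-indexed elements.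
import Mathlib
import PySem

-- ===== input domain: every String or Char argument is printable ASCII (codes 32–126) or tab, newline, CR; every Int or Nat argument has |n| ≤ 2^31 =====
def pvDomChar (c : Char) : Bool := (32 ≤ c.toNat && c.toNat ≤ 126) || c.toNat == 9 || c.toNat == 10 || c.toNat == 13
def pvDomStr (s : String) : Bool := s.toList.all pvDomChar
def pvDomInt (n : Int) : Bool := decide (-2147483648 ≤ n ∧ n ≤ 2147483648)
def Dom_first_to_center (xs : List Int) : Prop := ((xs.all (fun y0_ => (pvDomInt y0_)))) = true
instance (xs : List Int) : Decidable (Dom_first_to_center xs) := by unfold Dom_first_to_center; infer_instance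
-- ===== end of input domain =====

-- B replaces A's deque-and-flag loop by two extended slices (evens reversed ++ odds); objective: simpler.

-- ===== PORT A =====
-- deque: appendleft = cons onto the front, append = append at the back; the flag flips each step
def first_to_center (xs : List Int) : List Int :=
  (xs.foldl (fun (st : List Int × Bool) x =>
      (if st.2 then x :: st.1 else st.1 ++ [x], ! st.2)) ([], true)).1

-- ===== PORT B =====
def first_to_center_alt (xs : List Int) : List Int :=
  let evens := (PySem.List.slice? xs none none 2).getD []      -- xs[::2]
  let odds := (PySem.List.slice? xs (some 1) none 2).getD []   -- xs[1::2]
  ((PySem.List.slice? evens none none (-1)).getD []) ++ odds   -- evens[::-1] + odds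

-- ===== PRECONDITION & SPEC =====
def Spec_first_to_center (xs : List Int) (out : List Int) : Prop := out = first_to_center_alt xs
instance (xs : List Int) (out : List Int) : Decidable (Spec_first_to_center xs out) := by unfold Spec_first_to_center; infer_instance

-- ===== CLAIM (what is proved, stated in full; the proofs are below) =====
def Claim_equal_first_to_center : Prop := ∀ (xs : List Int), Dom_first_to_center xs → Spec_first_to_center xs (first_to_center xs)

-- ===== LEMMAS AND PROOFS =====

mutual
def pvEvens : List Int → List Int
  | [] => []
  | x :: r => x :: pvOdds r
def pvOdds : List Int → List Int
  | [] => []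
  | _ :: r => pvEvens r
end

theorem pv_loop_inv (xs : List Int) : ∀ d : List Int,
    ((xs.foldl (fun (st : List Int × Bool) x =>
      (if st.2 then x :: st.1 else st.1 ++ [x], ! st.2)) (d, true)).1
      = (pvEvens xs).reverse ++ d ++ pvOdds xs)
    ∧ ((xs.foldl (fun (st : List Int × Bool) x =>
      (if st.2 then x :: st.1 else st.1 ++ [x], ! st.2)) (d, false)).1
      = (pvOdds xs).reverse ++ d ++ pvEvens xs) := by
  induction xs with
  | nil => intro d; simp [pvEvens, pvOdds]
  | cons x r ih =>
    intro d
    constructor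
    · simpa [pvEvens, pvOdds] using (ih (x :: d)).2
    · simpa [pvEvens, pvOdds] using (ih (d ++ [x])).1

theorem pv_filterMap_evens (xs : List Int) :
    List.filterMap (fun k => xs[2*k]?) (List.range ((xs.length+1)/2)) = pvEvens xs := by
  have h : ∀ n (ys : List Int), ys.length ≤ n →
      List.filterMap (fun k => ys[2*k]?) (List.range ((ys.length+1)/2)) = pvEvens ys := by
    intro n
    induction n with
    | zero => intro ys h; simp at h; simp [h, pvEvens]
    | succ m ih =>
      intro ys hlen
      match ys with
      | [] => simp [pvEvens]
      | [x] => simp [pvEvens, pvOdds]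
      | x :: y :: r =>
        have hc : (r.length + 2 + 1) / 2 = (r.length + 1) / 2 + 1 := by omega
        simp only [List.length_cons]
        rw [hc, List.range_succ_eq_map]
        rw [List.filterMap_cons]
        simp only [Nat.mul_zero, List.getElem?_cons_zero, List.filterMap_map]
        have hfun : ∀ k, ((fun k => (x :: y :: r)[2*k]?) ∘ Nat.succ) k = (fun k => r[2*k]?) k := by
          intro k
          have h1 : 2 * Nat.succ k = (2*k + 1) + 1 := by omega
          simp [Function.comp, h1]
        rw [funext hfun]
        have hr : r.length ≤ m := by simp at hlen; omega
        rw [ih r hr]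
        simp [pvEvens, pvOdds]
  exact h xs.length xs le_rfl

theorem pv_filterMap_odds (xs : List Int) :
    List.filterMap (fun k => xs[2*k+1]?) (List.range (xs.length/2)) = pvOdds xs := by
  have h : ∀ n (ys : List Int), ys.length ≤ n →
      List.filterMap (fun k => ys[2*k+1]?) (List.range (ys.length/2)) = pvOdds ys := by
    intro n
    induction n with
    | zero => intro ys h; simp at h; simp [h, pvOdds]
    | succ m ih =>
      intro ys hlen
      match ys with
      | [] => simp [pvOdds]
      | [x] => simp [pvOdds, pvEvens]
      | x :: y :: r =>
        have hc : (r.length + 2) / 2 = r.length / 2 + 1 := by omega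
        simp only [List.length_cons]
        rw [hc, List.range_succ_eq_map]
        rw [List.filterMap_cons]
        simp only [Nat.mul_zero, Nat.zero_add, List.getElem?_cons_succ,
          List.getElem?_cons_zero, List.filterMap_map]
        have hfun : ∀ k, ((fun k => (y :: r)[2*k]?) ∘ Nat.succ) k = (fun k => r[2*k+1]?) k := by
          intro k
          have h1 : 2 * Nat.succ k = (2*k + 1) + 1 := by omega
          simp [Function.comp, h1]
        rw [funext hfun]
        have hr : r.length ≤ m := by simp at hlen; omega
        rw [ih r hr]
        simp [pvOdds, pvEvens]
  exact h xs.length xs le_rfl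

theorem pv_slice_evens (xs : List Int) :
    PySem.List.slice? xs none none 2 = some (pvEvens xs) := by
  rw [PySem.List.slice?, PySem.List.sliceIndices]
  simp only
  norm_num
  have hcount : (if 0 < xs.length then (((xs.length:Int) + 2 - 1) / 2).toNat else 0)
      = (xs.length + 1) / 2 := by
    split_ifs with h <;> omega
  rw [hcount]
  have hfun : ∀ k, (fun (k : Nat) => xs[(2 * (k:Int)).toNat]?) k = (fun (k : Nat) => xs[2*k]?) k := by
    intro k
    have h1 : (2 * (k:Int)).toNat = 2 * k := by omega
    simp only [h1]
  rw [funext hfun, pv_filterMap_evens]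

theorem pv_slice_odds (xs : List Int) :
    PySem.List.slice? xs (some 1) none 2 = some (pvOdds xs) := by
  rw [PySem.List.slice?, PySem.List.sliceIndices]
  simp only
  norm_num
  have hstart : min (1:Int) (xs.length:Int) = if xs.length = 0 then 0 else 1 := by
    split_ifs with h <;> omega
  rw [hstart]
  by_cases h0 : xs.length = 0
  · match xs, h0 with
    | [], _ => simp [pvOdds]
  · simp only [if_neg h0]
    have hcount : (if 1 < xs.length then (((xs.length:Int) - 1 + 2 - 1) / 2).toNat else 0)
        = xs.length / 2 := by
      split_ifs with h <;> omega
    rw [hcount]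
    have hfun : ∀ k, (fun (k : Nat) => xs[((1:Int) + 2 * (k:Int)).toNat]?) k = (fun (k : Nat) => xs[2*k+1]?) k := by
      intro k
      have h1 : ((1:Int) + 2 * (k:Int)).toNat = 2 * k + 1 := by omega
      simp only [h1]
    rw [funext hfun, pv_filterMap_odds]

-- ===== VERDICT (by name: the statement is the Claim_ definition above) =====
theorem first_to_center_spec : Claim_equal_first_to_center := by
  intro xs _
  unfold Spec_first_to_center first_to_center first_to_center_alt
  rw [pv_slice_evens, pv_slice_odds]
  simp only [Option.getD_some, PySem.List.slice?_none_none_neg_one]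
  simpa using (pv_loop_inv xs []).1
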